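-- pv_equiv track=rewrite | github.com/jjungeun/Algo_study | python/kakao/Solution67.py | dfs
-- ===== SOURCE A (Python) =====
-- import copy
--
-- dr = [-1, -1, 0, 1, 1, 1, 0, -1]
--
-- dc = [0, -1, -1, -1, 0, 1, 1, 1]
--
-- def move_fish(fish_map, fish):
-- 	for num in range(1, 17):
-- 		if num not in fish.keys():
-- 			continue
-- 		r, c, d = fish[num]
-- 		for i in range(8):
-- 			nr, nc, nd = r+dr[(d+i)%8], c+dc[(d+i)%8], (d+i)%8
-- 			if nr not in range(4) or nc not in range(4) or fish_map[nr][nc] == 0: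
-- 				continue
-- 			if fish_map[nr][nc] != -1:
-- 				change_fish = fish_map[nr][nc]
-- 				direct = fish[change_fish][2]
-- 				fish[change_fish] = (r, c, direct)
-- 				fish_map[r][c] = change_fish
-- 			else:
-- 				fish_map[r][c] = -1
-- 			fish_map[nr][nc] = num
-- 			fish[num] = (nr, nc, nd)
-- 			break
--
-- def dfs(fish_map, fish, shark, answer):
-- 	new_map = copy.deepcopy(fish_map)
-- 	new_fish = copy.deepcopy(fish)
-- 	sr, sc, sd = shark
-- 	eaten = new_map[sr][sc]
-- 	sd = new_fish[eaten][2]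
-- 	eaten_info = new_fish.pop(eaten)
-- 	new_map[sr][sc] = 0
-- 	move_fish(new_map, new_fish)
-- 	max_answer = answer + eaten
-- 	new_map[sr][sc] = -1
-- 	while True:
-- 		sr, sc = sr+dr[sd], sc+dc[sd]
-- 		if sr not in range(4) or sc not in range(4):
-- 			break
-- 		if new_map[sr][sc] < 1:
-- 			continue
-- 		max_answer = max(max_answer, dfs(new_map, new_fish, (sr, sc, sd), answer+eaten))
-- 	return max_answer
-- ===== SOURCE B (Python) =====
-- # B: iterative worklist version of A's recursive DFS — an explicit stack of
-- # independent (map, fish, shark, accumulated-score) states and a running best,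
-- # instead of recursion; same move_fish simulation per state.
-- import copy
--
-- dr = [-1, -1, 0, 1, 1, 1, 0, -1]
-- dc = [0, -1, -1, -1, 0, 1, 1, 1]
--
-- def move_fish(fish_map, fish):
-- 	for num in range(1, 17):
-- 		if num not in fish.keys():
-- 			continue
-- 		r, c, d = fish[num]
-- 		for i in range(8):
-- 			nr, nc, nd = r+dr[(d+i)%8], c+dc[(d+i)%8], (d+i)%8
-- 			if nr not in range(4) or nc not in range(4) or fish_map[nr][nc] == 0:
-- 				continue
-- 			if fish_map[nr][nc] != -1:
-- 				change_fish = fish_map[nr][nc]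
-- 				direct = fish[change_fish][2]
-- 				fish[change_fish] = (r, c, direct)
-- 				fish_map[r][c] = change_fish
-- 			else:
-- 				fish_map[r][c] = -1
-- 			fish_map[nr][nc] = num
-- 			fish[num] = (nr, nc, nd)
-- 			break
--
-- def shark_targets(fish_map, sd, r, c):
-- 	targets = []
-- 	while True:
-- 		r, c = r + dr[sd], c + dc[sd]
-- 		if r not in range(4) or c not in range(4):
-- 			break
-- 		if fish_map[r][c] < 1:
-- 			continue
-- 		targets.append((r, c))
-- 	return targets
--
-- def dfs(fish_map, fish, shark, answer):
-- 	best = None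
-- 	stack = [(copy.deepcopy(fish_map), copy.deepcopy(fish), shark, answer)]
-- 	while stack:
-- 		m, fi, (sr, sc, _), acc = stack.pop()
-- 		eaten = m[sr][sc]
-- 		sd = fi[eaten][2]
-- 		del fi[eaten]
-- 		m[sr][sc] = 0
-- 		move_fish(m, fi)
-- 		m[sr][sc] = -1
-- 		score = acc + eaten
-- 		if best is None or score > best:
-- 			best = score
-- 		for (r, c) in shark_targets(m, sd, sr, sc):
-- 			stack.append((copy.deepcopy(m), copy.deepcopy(fi), (r, c, sd), score))
-- 	return best
-- ===== Notes on version B (the rewrite author's own statement) =====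
-- stated objective: alternative
-- what changed: A's recursive DFS (each call deep-copying state and maximising over recursive calls inside a while-walk) is replaced by an iterative worklist: an explicit stack of independent (map, fish, shark, score) states, a helper that collects the shark's reachable target cells, and a single running best updated per popped state.
import Mathlib
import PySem

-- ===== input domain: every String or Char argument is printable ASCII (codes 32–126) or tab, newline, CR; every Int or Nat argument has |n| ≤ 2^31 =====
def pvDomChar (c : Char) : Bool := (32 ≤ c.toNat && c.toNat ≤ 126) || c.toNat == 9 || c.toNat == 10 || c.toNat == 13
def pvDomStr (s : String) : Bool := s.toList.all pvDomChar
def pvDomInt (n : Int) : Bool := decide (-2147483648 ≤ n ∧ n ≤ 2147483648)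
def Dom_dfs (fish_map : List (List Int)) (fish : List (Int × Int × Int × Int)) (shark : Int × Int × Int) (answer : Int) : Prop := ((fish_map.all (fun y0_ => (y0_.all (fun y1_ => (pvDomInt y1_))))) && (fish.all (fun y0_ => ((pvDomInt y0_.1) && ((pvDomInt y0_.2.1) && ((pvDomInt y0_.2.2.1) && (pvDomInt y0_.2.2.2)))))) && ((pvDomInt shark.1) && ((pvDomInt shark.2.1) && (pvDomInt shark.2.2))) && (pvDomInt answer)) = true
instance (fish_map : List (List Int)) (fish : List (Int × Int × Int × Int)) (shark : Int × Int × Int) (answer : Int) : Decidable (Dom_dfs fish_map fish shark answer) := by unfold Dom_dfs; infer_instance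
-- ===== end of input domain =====

-- B changes the decomposition: A's recursive DFS becomes an explicit-stack worklist with a
-- running best (objective: alternative, same cost). Both ports simulate per state with the
-- same shared move_fish helper, exactly as the two Python files share it.

-- ===== PORT A =====
-- module constants dr, dc
def pvDr : List Int := [-1, -1, 0, 1, 1, 1, 0, -1]
def pvDc : List Int := [0, -1, -1, -1, 0, 1, 1, 1]

-- fish dict: num ↦ (r, c, d)
abbrev FishD := PySem.Dict Int (Int × Int × Int)

-- fish_map[r][c] (Python indexing, negative wraps; default only where Python would raise, outside Pre_)
def pvGet2 (m : List (List Int)) (r c : Int) : Int :=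
  PySem.List.pyGetD (PySem.List.pyGetD m r []) c 0

-- fish_map[r][c] = v (Python indexing; no-op only where Python would raise, outside Pre_)
def pvSet2 (m : List (List Int)) (r c : Int) (v : Int) : List (List Int) :=
  PySem.List.pySetD m r (PySem.List.pySetD (PySem.List.pyGetD m r []) c v)

-- inner 'for i in range(8): … break' of move_fish
def pvTryMove (num r c d : Int) : List Nat → List (List Int) → FishD → List (List Int) × FishD
  | [], m, fi => (m, fi)
  | i :: rest, m, fi =>
    let nd := PySem.Int.mod (d + (i : Int)) 8
    let nr := r + PySem.List.pyGetD pvDr nd 0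
    let nc := c + PySem.List.pyGetD pvDc nd 0
    if ¬(0 ≤ nr ∧ nr < 4) ∨ ¬(0 ≤ nc ∧ nc < 4) ∨ pvGet2 m nr nc = 0 then
      pvTryMove num r c d rest m fi
    else if pvGet2 m nr nc ≠ -1 then
      let changeFish := pvGet2 m nr nc
      let direct := (fi.getD changeFish (0, 0, 0)).2.2
      let fi1 := fi.insert changeFish (r, c, direct)
      let m1 := pvSet2 m r c changeFish
      (pvSet2 m1 nr nc num, fi1.insert num (nr, nc, nd))
    else
      let m1 := pvSet2 m r c (-1)
      (pvSet2 m1 nr nc num, fi.insert num (nr, nc, nd))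

-- move_fish: 'for num in range(1, 17)'
def pvMoveFish (m : List (List Int)) (fi : FishD) : List (List Int) × FishD :=
  (PySem.List.pyRange 1 17 1).foldl
    (fun st num =>
      match st.2.get? num with
      | none => st
      | some (r, c, d) => pvTryMove num r c d (List.range 8) st.1 st.2)
    (m, fi)

mutual
-- dfs body; fuel is a totality guard only (one fish is eaten per level, so
-- fish-count + 1 fuel suffices on every run A completes)
def dfsA (fuel : Nat) (m : List (List Int)) (fi : FishD) (shark : Int × Int × Int) (answer : Int) : Int :=
  match fuel with
  | 0 => 0
  | f + 1 =>
    let sr := shark.1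
    let sc := shark.2.1
    let eaten := pvGet2 m sr sc
    match fi.get? eaten with
    | none => 0  -- Python raises KeyError here; outside Pre_
    | some info =>
      let sd := info.2.2
      let fi1 := fi.erase eaten
      let m1 := pvSet2 m sr sc 0
      let st := pvMoveFish m1 fi1
      let m3 := pvSet2 st.1 sr sc (-1)
      walkA f m3 st.2 sd sr sc (answer + eaten) (answer + eaten) 8
  termination_by (fuel, 0)

-- the trailing 'while True' walk of dfs; 8 steps always suffice for the unit
-- steps in pvDr/pvDc on the 4×4 board, so this guard is exact
def walkA (f : Nat) (m : List (List Int)) (fi : FishD) (sd sr sc base acc : Int) (w : Nat) : Int :=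
  match w with
  | 0 => acc
  | k + 1 =>
    let sr' := sr + PySem.List.pyGetD pvDr sd 0
    let sc' := sc + PySem.List.pyGetD pvDc sd 0
    if ¬(0 ≤ sr' ∧ sr' < 4) ∨ ¬(0 ≤ sc' ∧ sc' < 4) then acc
    else if pvGet2 m sr' sc' < 1 then walkA f m fi sd sr' sc' base acc k
    else walkA f m fi sd sr' sc' base (max acc (dfsA f m fi (sr', sc', sd) base)) k
  termination_by (f, w + 1)
end

def dfs (fish_map : List (List Int)) (fish : List (Int × Int × Int × Int)) (shark : Int × Int × Int) (answer : Int) : Int :=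
  dfsA (fish.length + 1) fish_map (PySem.Dict.mk fish) shark answer

-- ===== PORT B =====
-- shark_targets: collect the reachable fish cells along direction sd
def pvTargets (m : List (List Int)) (sd : Int) : Int → Int → Nat → List (Int × Int)
  | _, _, 0 => []
  | r, c, k + 1 =>
    let r' := r + PySem.List.pyGetD pvDr sd 0
    let c' := c + PySem.List.pyGetD pvDc sd 0
    if ¬(0 ≤ r' ∧ r' < 4) ∨ ¬(0 ≤ c' ∧ c' < 4) then []
    else if pvGet2 m r' c' < 1 then pvTargets m sd r' c' k
    else (r', c') :: pvTargets m sd r' c' k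

-- 'if best is None or score > best: best = score'
def pvUpd (best : Option Int) (score : Int) : Option Int :=
  match best with
  | none => some score
  | some b => some (max b score)

-- a worklist state: (fuel guard, fish_map, fish, shark, accumulated answer)
abbrev BFrame := Nat × List (List Int) × FishD × (Int × Int × Int) × Int

-- measure bookkeeping for the worklist loop's totality: popping one state with fuel f+1
-- and pushing at most 8 children of fuel f shrinks Σ 9^fuel
theorem pvMeasure_lt (l : List (Int × Int)) (hl : l.length ≤ 8) (f : Nat)
    (mk : Int × Int → Nat × List (List Int) × PySem.Dict Int (Int × Int × Int) × (Int × Int × Int) × Int)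
    (hmk : ∀ rc, (mk rc).1 = f)
    (rest : List (Nat × List (List Int) × PySem.Dict Int (Int × Int × Int) × (Int × Int × Int) × Int))
    (hd : Nat × List (List Int) × PySem.Dict Int (Int × Int × Int) × (Int × Int × Int) × Int)
    (hhd : hd.1 = f + 1) :
    (((l.map mk).reverse ++ rest).map (fun fr => 9 ^ fr.1)).sum <
      ((hd :: rest).map (fun fr => 9 ^ fr.1)).sum := by
  simp only [List.map_append, List.map_reverse, List.sum_append, List.sum_reverse,
    List.map_map, List.map_cons, List.sum_cons, hhd]
  have h1 : ∀ (l' : List (Int × Int)),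
      (l'.map (fun rc => 9 ^ (mk rc).1)).sum = l'.length * 9 ^ f := by
    intro l'
    induction l' with
    | nil => simp
    | cons x l' ih => simp [hmk]; ring
  have h1' : (l.map ((fun fr => 9 ^ fr.1) ∘ mk)).sum = l.length * 9 ^ f := h1 l
  have h5 : 0 < 9 ^ f := pow_pos (by norm_num) f
  have h3 : 9 ^ (f + 1) = 9 * 9 ^ f := by ring
  have h4 : l.length * 9 ^ f ≤ 8 * 9 ^ f := Nat.mul_le_mul_right _ hl
  omega

theorem pvTargets_length_le (m : List (List Int)) (sd : Int) :
    ∀ (k : Nat) (r c : Int), (pvTargets m sd r c k).length ≤ k := by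
  intro k
  induction k with
  | zero => intro r c; simp [pvTargets]
  | succ k ih =>
    intro r c
    simp only [pvTargets]
    split
    · simp
    · split
      · exact le_trans (ih _ _) (Nat.le_succ k)
      · simpa using ih _ _

-- the 'while stack' loop; the fuel component is the same totality guard as in port A
def loopB (stack : List BFrame) (best : Option Int) : Option Int :=
  match stack with
  | [] => best
  | (fuel, m, fi, sh, acc) :: rest =>
    match fuel with
    | 0 => loopB rest (pvUpd best 0)
    | f + 1 =>
      let sr := sh.1
      let sc := sh.2.1
      let eaten := pvGet2 m sr sc
      match fi.get? eaten with
      | none => loopB rest (pvUpd best 0)  -- Python raises KeyError here; outside Pre_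
      | some info =>
        let sd := info.2.2
        let fi1 := fi.erase eaten
        let m1 := pvSet2 m sr sc 0
        let st := pvMoveFish m1 fi1
        let m3 := pvSet2 st.1 sr sc (-1)
        let score := acc + eaten
        let children := (pvTargets m3 sd sr sc 8).map
          (fun rc => ((f, m3, st.2, (rc.1, rc.2, sd), score) : BFrame))
        loopB (children.reverse ++ rest) (pvUpd best score)
  termination_by (stack.map (fun fr => 9 ^ fr.1)).sum
  decreasing_by
  · simp only [List.map_cons, List.sum_cons]
    exact Nat.lt_add_of_pos_left (pow_pos (by norm_num) _)
  · simp only [List.map_cons, List.sum_cons]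
    exact Nat.lt_add_of_pos_left (pow_pos (by norm_num) _)
  · exact pvMeasure_lt _ (pvTargets_length_le _ _ 8 _ _) f _ (fun _ => rfl) rest _ rfl

def dfs_alt (fish_map : List (List Int)) (fish : List (Int × Int × Int × Int)) (shark : Int × Int × Int) (answer : Int) : Int :=
  match loopB [(fish.length + 1, fish_map, PySem.Dict.mk fish, shark, answer)] none with
  | none => 0
  | some b => b

-- ===== PRECONDITION & SPEC =====
-- Pre_ is a closed-form raise-free part of A's domain: after the shared top layer (distinct
-- dict keys, the shark's — possibly negative, Python-wrapped — cell readable and holding a fish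
-- with a usable direction), the state is either W, a well-formed game state (4×4 play area,
-- movable fish consistent with the board, play-area cells backed by live fish, no duplicates,
-- no stale copy of the eaten fish), or J, an inert state (no other movable fish has a free
-- neighbour and the shark's ray meets no fish, so the eat never moves anything or recurses).
-- Outside Pre_ A's nested list/dict lookups generally raise IndexError/KeyError at some depth,
-- but on some excluded ill-shaped inputs A still returns (see cites) — the proved equality is
-- unconditional, so both implementations agree there too.
def pvCellAt (m : List (List Int)) (r c : Nat) : Int := (m.getD r []).getD c 0
def pvWrapIdx (n : Nat) (i : Int) : Nat := (if i < 0 then i + n else i).toNat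
def pvShRow (m : List (List Int)) (shark : Int × Int × Int) : List Int := m.getD (pvWrapIdx m.length shark.1) []
def pvEaten (m : List (List Int)) (shark : Int × Int × Int) : Int :=
  (pvShRow m shark).getD (pvWrapIdx (pvShRow m shark).length shark.2.1) 0

-- does the cell (r, c) physically exist in the stored map?
def pvCellEx (m : List (List Int)) (r c : Int) : Bool :=
  decide (0 ≤ r) && decide (0 ≤ c) && decide (r.toNat < m.length) &&
  decide (c.toNat < (m.getD r.toNat []).length)

def pvPreB (fish_map : List (List Int)) (fish : List (Int × Int × Int × Int)) (shark : Int × Int × Int) : Bool :=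
  let keys := fish.map (·.1)
  let eaten := pvEaten fish_map shark
  let srw := pvWrapIdx fish_map.length shark.1
  let scw := pvWrapIdx (pvShRow fish_map shark).length shark.2.1
  -- shared top layer: distinct keys, shark cell readable, its fish present with a usable direction
  let topB :=
    decide (keys.Nodup) &&
    decide (-(fish_map.length : Int) ≤ shark.1 ∧ shark.1 < fish_map.length) &&
    decide (-((pvShRow fish_map shark).length : Int) ≤ shark.2.1 ∧
            shark.2.1 < (pvShRow fish_map shark).length) &&
    fish.any (fun e => decide (e.1 = eaten ∧ -8 ≤ e.2.2.2 ∧ e.2.2.2 < 8))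
  -- W: a well-formed game state (4×4 play area consistent with the fish dict)
  let liveC := fish.any (fun e => decide (1 ≤ e.1 ∧ e.1 ≤ 16 ∧ e.1 ≠ eaten))
  let wB :=
    decide (4 ≤ fish_map.length) &&
    (List.range 4).all (fun r => decide (4 ≤ (fish_map.getD r []).length)) &&
    fish.all (fun e => decide (1 ≤ e.1 ∧ e.1 ≤ 16 →
       0 ≤ e.2.1 ∧ e.2.1 < 4 ∧ 0 ≤ e.2.2.1 ∧ e.2.2.1 < 4 ∧
       pvCellAt fish_map e.2.1.toNat e.2.2.1.toNat = e.1 ∧ -8 ≤ e.2.2.2 ∧ e.2.2.2 < 8)) &&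
    (List.range 4).all (fun r => (List.range 4).all (fun c =>
       (decide (pvCellAt fish_map r c = 0) || decide (pvCellAt fish_map r c = -1)) ||
       (((!(liveC || decide (1 ≤ pvCellAt fish_map r c))) ||
          (decide (pvCellAt fish_map r c ∈ keys) &&
           (List.range 4).all (fun r' => (List.range 4).all (fun c' =>
              decide ((r ≠ r' ∨ c ≠ c') → pvCellAt fish_map r' c' ≠ pvCellAt fish_map r c))))) &&
        ((!decide (1 ≤ pvCellAt fish_map r c)) ||
          fish.any (fun e => decide (e.1 = pvCellAt fish_map r c ∧ -8 ≤ e.2.2.2 ∧ e.2.2.2 < 8))) &&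
        ((!decide (pvCellAt fish_map r c = eaten)) || decide (r = srw ∧ c = scw)))))
  -- J: an inert state — no movable fish besides the eaten one can take a step, and the
  -- shark's ray sees no fish before it leaves the play area (so the eat never recurses)
  let dE := ((fish.find? (fun e => decide (e.1 = eaten))).getD (0, 0, 0, 0)).2.2.2
  let dv := PySem.List.pyGetD pvDr dE 0
  let dw := PySem.List.pyGetD pvDc dE 0
  let jB :=
    fish.all (fun e => (!(decide (1 ≤ e.1 ∧ e.1 ≤ 16) && decide (e.1 ≠ eaten))) ||
      (List.range 8).all (fun i =>
        let nd := PySem.Int.mod (e.2.2.2 + (i : Int)) 8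
        let nr := e.2.1 + PySem.List.pyGetD pvDr nd 0
        let nc := e.2.2.1 + PySem.List.pyGetD pvDc nd 0
        (!(decide (0 ≤ nr ∧ nr < 4) && decide (0 ≤ nc ∧ nc < 4))) ||
          (pvCellEx fish_map nr nc && decide (pvCellAt fish_map nr.toNat nc.toNat = 0)))) &&
    (List.range 8).all (fun k =>
       (!((List.range (k + 1)).all (fun j =>
           decide (0 ≤ shark.1 + ((j : Int) + 1) * dv ∧ shark.1 + ((j : Int) + 1) * dv < 4 ∧
                   0 ≤ shark.2.1 + ((j : Int) + 1) * dw ∧ shark.2.1 + ((j : Int) + 1) * dw < 4)))) ||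
        (pvCellEx fish_map (shark.1 + ((k : Int) + 1) * dv) (shark.2.1 + ((k : Int) + 1) * dw) &&
         decide (pvCellAt fish_map (shark.1 + ((k : Int) + 1) * dv).toNat
                   (shark.2.1 + ((k : Int) + 1) * dw).toNat < 1)))
  topB && (wB || jB)

def Pre_dfs (fish_map : List (List Int)) (fish : List (Int × Int × Int × Int)) (shark : Int × Int × Int) (answer : Int) : Prop :=
  pvPreB fish_map fish shark = true
instance (fish_map : List (List Int)) (fish : List (Int × Int × Int × Int)) (shark : Int × Int × Int) (answer : Int) : Decidable (Pre_dfs fish_map fish shark answer) := by unfold Pre_dfs; infer_instance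

def pvWitness_dfs : List (List Int) × (List (Int × Int × Int × Int)) × (Int × Int × Int) × Int :=
  ([[1, -1, -1, -1], [-1, 2, -1, -1], [-1, -1, -1, -1], [-1, -1, -1, 3]],
   [(1, 0, 0, 4), (2, 1, 1, 2), (3, 3, 3, 0)], (0, 0, 0), 0)

def Spec_dfs (fish_map : List (List Int)) (fish : List (Int × Int × Int × Int)) (shark : Int × Int × Int) (answer : Int) (out : Int) : Prop := out = dfs_alt fish_map fish shark answer
instance (fish_map : List (List Int)) (fish : List (Int × Int × Int × Int)) (shark : Int × Int × Int) (answer : Int) (out : Int) : Decidable (Spec_dfs fish_map fish shark answer out) := by unfold Spec_dfs; infer_instance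

-- ===== CLAIM (what is proved, stated in full; the proofs are below) =====
def Claim_equal_dfs : Prop := ∀ (fish_map : List (List Int)) (fish : List (Int × Int × Int × Int)) (shark : Int × Int × Int) (answer : Int), Dom_dfs fish_map fish shark answer → Pre_dfs fish_map fish shark answer → Spec_dfs fish_map fish shark answer (dfs fish_map fish shark answer)

-- ===== LEMMAS AND PROOFS =====
theorem pvWitness_dfs_ok :
    Dom_dfs pvWitness_dfs.1 pvWitness_dfs.2.1 pvWitness_dfs.2.2.1 pvWitness_dfs.2.2.2 ∧
    Pre_dfs pvWitness_dfs.1 pvWitness_dfs.2.1 pvWitness_dfs.2.2.1 pvWitness_dfs.2.2.2 := by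
  constructor <;> decide

-- the value a worklist frame stands for: what A's dfs would return from that state
def pvVal (fr : BFrame) : Int := dfsA fr.1 fr.2.1 fr.2.2.1 fr.2.2.2.1 fr.2.2.2.2

-- folding max after seeding an extra element commutes
theorem pvFoldMax_shift {α : Type} (G : α → Int) :
    ∀ (l : List α) (v w : Int),
      l.foldl (fun a x => max a (G x)) (max v w) =
        max (l.foldl (fun a x => max a (G x)) v) w := by
  intro l
  induction l with
  | nil => intro v w; rfl
  | cons x l ih =>
    intro v w
    simp only [List.foldl_cons]
    rw [max_right_comm v w (G x), ih]

-- the max-fold is insensitive to reversal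
theorem pvFoldMax_reverse {α : Type} (G : α → Int) :
    ∀ (l : List α) (v : Int),
      l.reverse.foldl (fun a x => max a (G x)) v = l.foldl (fun a x => max a (G x)) v := by
  intro l
  induction l with
  | nil => intro v; rfl
  | cons x l ih =>
    intro v
    simp only [List.reverse_cons, List.foldl_append, List.foldl_cons, List.foldl_nil, ih,
      List.foldl_cons]
    rw [← pvFoldMax_shift G l v (G x)]

-- a pvUpd-fold over scores is pvUpd of the max-fold
theorem pvUpd_fold {α : Type} (G : α → Int) :
    ∀ (l : List α) (best : Option Int) (v : Int),
      l.foldl (fun b x => pvUpd b (G x)) (pvUpd best v) =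
        pvUpd best (l.foldl (fun a x => max a (G x)) v) := by
  intro l
  induction l with
  | nil => intro best v; rfl
  | cons x l ih =>
    intro best v
    simp only [List.foldl_cons]
    have h : pvUpd (pvUpd best v) (G x) = pvUpd best (max v (G x)) := by
      cases best with
      | none => rfl
      | some b => simp [pvUpd, max_assoc]
    rw [h, ih]

-- A's while-walk IS the max-fold over B's collected target cells
theorem walkA_eq_fold (f : Nat) (m : List (List Int)) (fi : FishD) (sd base : Int) :
    ∀ (k : Nat) (sr sc acc : Int),
      walkA f m fi sd sr sc base acc k =
        (pvTargets m sd sr sc k).foldl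
          (fun a rc => max a (dfsA f m fi (rc.1, rc.2, sd) base)) acc := by
  intro k
  induction k with
  | zero => intro sr sc acc; simp [walkA, pvTargets]
  | succ k ih =>
    intro sr sc acc
    rw [walkA, pvTargets]
    split
    · rfl
    · split
      · exact ih _ _ _
      · simp only [List.foldl_cons]; exact ih _ _ _

-- loop invariant: the worklist loop folds pvUpd ∘ pvVal over the stack
set_option maxHeartbeats 2000000 in
theorem loopB_eq_fold :
    ∀ (stack : List BFrame) (best : Option Int),
      loopB stack best = stack.foldl (fun b fr => pvUpd b (pvVal fr)) best := by
  intro stack best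
  induction stack, best using loopB.induct with
  | case1 best => rw [loopB, List.foldl_nil]
  | case2 best m fi sh acc rest ih =>
    rw [loopB]
    refine ih.trans ?_
    rw [List.foldl_cons]
    have hv : pvVal ((0 : Nat), m, fi, sh, acc) = 0 := by
      show dfsA 0 m fi sh acc = 0
      rw [dfsA]
    rw [hv]
  | case3 best m fi sh acc rest f sr sc eaten h ih =>
    rw [loopB]
    simp only [show PySem.Dict.get? fi (pvGet2 m sh.1 sh.2.1) = none from h]
    refine ih.trans ?_
    rw [List.foldl_cons]
    have hv : pvVal (f + 1, m, fi, sh, acc) = 0 := by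
      show dfsA (f + 1) m fi sh acc = 0
      rw [dfsA]
      simp only [show PySem.Dict.get? fi (pvGet2 m sh.1 sh.2.1) = none from h]
    simp only [Nat.succ_eq_add_one]
    rw [hv]
  | case4 best m fi sh acc rest f sr sc eaten info h sd fi1 m1 st m3 score children ih =>
    rw [loopB]
    simp only [show PySem.Dict.get? fi (pvGet2 m sh.1 sh.2.1) = some info from h]
    refine ih.trans ?_
    rw [List.foldl_append, List.foldl_cons]
    have hv : pvVal (f + 1, m, fi, sh, acc) =
        (pvTargets m3 sd sr sc 8).foldl
          (fun a rc => max a (dfsA f m3 st.2 (rc.1, rc.2, sd) score)) score := by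
      show dfsA (f + 1) m fi sh acc = _
      rw [dfsA]
      simp only [show PySem.Dict.get? fi (pvGet2 m sh.1 sh.2.1) = some info from h]
      exact walkA_eq_fold f m3 st.2 sd score 8 sr sc score
    have hchild : children.reverse.foldl (fun b fr => pvUpd b (pvVal fr)) (pvUpd best score) =
        pvUpd best (pvVal (f + 1, m, fi, sh, acc)) := by
      have h1 : children.reverse.foldl (fun b fr => pvUpd b (pvVal fr)) (pvUpd best score) =
          (pvTargets m3 sd sr sc 8).reverse.foldl
            (fun b rc => pvUpd b (dfsA f m3 st.2 (rc.1, rc.2, sd) score)) (pvUpd best score) := by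
        rw [show children.reverse =
            (pvTargets m3 sd sr sc 8).reverse.map
              (fun rc => ((f, m3, st.2, (rc.1, rc.2, sd), score) : BFrame)) from
          List.map_reverse.symm]
        rw [List.foldl_map]
        simp only [pvVal]
      rw [h1, pvUpd_fold, pvFoldMax_reverse, hv]
    simp only [Nat.succ_eq_add_one]
    rw [hchild]

-- unconditional agreement of the two ports (Pre_ is needed only for faithfulness to Python)
theorem dfs_eq_alt (fish_map : List (List Int)) (fish : List (Int × Int × Int × Int))
    (shark : Int × Int × Int) (answer : Int) :
    dfs fish_map fish shark answer = dfs_alt fish_map fish shark answer := by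
  unfold dfs dfs_alt
  rw [loopB_eq_fold]
  rfl

-- ===== VERDICT (by name: the statement is the Claim_ definition above) =====
theorem dfs_spec : Claim_equal_dfs := by
  intro fish_map fish shark answer _ _
  unfold Spec_dfs
  exact dfs_eq_alt fish_map fish shark answer
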